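-- pv_equiv track=rewrite | github.com/SebasTombe10/P1ADAII | cod_keys.py | cod_keys
-- ===== SOURCE A (Python) =====
-- def cod_keys(diccionario):
--     asignaturas, dicestudiantes = diccionario
--     codigos_asignaturas = {}
--     for cod_asignatura in asignaturas.keys():
--         codigos_asignaturas[cod_asignatura] = []
--
--     for estudiante, asignaturas_solicitadas in dicestudiantes.items():
--         for cod_asignatura, prioridad in asignaturas_solicitadas:
--             if cod_asignatura in asignaturas:
--                 codigos_asignaturas[cod_asignatura].append((estudiante, prioridad))
--
--     return(codigos_asignaturas)
-- ===== SOURCE B (Python) =====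
-- def cod_keys(diccionario):
--     asignaturas, dicestudiantes = diccionario
--     return {cod: [(est, pri)
--                   for est, sols in dicestudiantes.items()
--                   for c, pri in sols
--                   if c == cod]
--             for cod in asignaturas}
-- ===== Notes on version B (the rewrite author's own statement) =====
-- stated objective: alternative
-- what changed: Replaces A's two-phase scatter (pre-seed a dict with empty lists, then append into it while scanning every student's requests with a membership guard) by a single dict comprehension that, for each subject in order, gathers its requesters by scanning the students; the mutable accumulator dict and the membership test disappear.
import Mathlib
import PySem

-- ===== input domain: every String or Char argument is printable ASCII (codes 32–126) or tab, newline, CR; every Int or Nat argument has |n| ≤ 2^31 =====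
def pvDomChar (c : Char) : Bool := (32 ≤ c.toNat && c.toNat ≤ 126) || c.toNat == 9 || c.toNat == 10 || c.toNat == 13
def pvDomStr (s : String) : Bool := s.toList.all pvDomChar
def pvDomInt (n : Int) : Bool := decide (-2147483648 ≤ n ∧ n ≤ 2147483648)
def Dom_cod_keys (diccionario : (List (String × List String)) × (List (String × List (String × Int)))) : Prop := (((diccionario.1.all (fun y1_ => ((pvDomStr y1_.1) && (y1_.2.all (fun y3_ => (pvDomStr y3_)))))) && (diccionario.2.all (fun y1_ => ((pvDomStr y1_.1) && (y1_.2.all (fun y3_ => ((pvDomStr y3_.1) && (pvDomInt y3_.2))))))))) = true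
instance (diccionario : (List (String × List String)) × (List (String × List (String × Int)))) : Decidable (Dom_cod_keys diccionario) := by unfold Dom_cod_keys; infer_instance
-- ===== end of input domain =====

-- B replaces A's mutable scatter dict (seed empty lists, then append while scanning requests)
-- by a per-subject gather comprehension; objective: alternative decomposition, not faster.

-- ===== PORT A =====
def cod_keys (diccionario : (List (String × List String)) × (List (String × List (String × Int)))) : List (String × List (String × Int)) :=
  let asignaturas := diccionario.1
  let dicestudiantes := diccionario.2
  let codigos_asignaturas : PySem.Dict String (List (String × Int)) :=
    asignaturas.foldl (fun d p => d.insert p.1 []) PySem.Dict.empty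
  let codigos_asignaturas :=
    dicestudiantes.foldl (fun d sp =>
      sp.2.foldl (fun d cp =>
        if asignaturas.any (fun q => q.1 == cp.1) then
          d.modify cp.1 [] (fun l => l ++ [(sp.1, cp.2)])
        else d) d) codigos_asignaturas
  codigos_asignaturas.items

-- ===== PORT B =====
def cod_keys_alt (diccionario : (List (String × List String)) × (List (String × List (String × Int)))) : List (String × List (String × Int)) :=
  diccionario.1.map (fun p =>
    (p.1, diccionario.2.flatMap (fun sp =>
      (sp.2.filter (fun cp => cp.1 == p.1)).map (fun cp => (sp.1, cp.2)))))

-- ===== PRECONDITION & SPEC =====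
-- Pre_ states the dict invariant of the association-list encoding: a Python dict cannot hold
-- two entries with the same subject key, so Pre_ excludes no input the Python A ever receives.
def Pre_cod_keys (diccionario : (List (String × List String)) × (List (String × List (String × Int)))) : Prop :=
  (diccionario.1.map Prod.fst).Nodup
instance (diccionario : (List (String × List String)) × (List (String × List (String × Int)))) : Decidable (Pre_cod_keys diccionario) := by unfold Pre_cod_keys; infer_instance

def pvWitness_cod_keys : ((List (String × List String)) × (List (String × List (String × Int)))) :=
  ([("A1", ["alg"]), ("B2", [])], [("stu1", [("A1", 1), ("C9", 2)]), ("stu2", [("A1", 3)])])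

def Spec_cod_keys (diccionario : (List (String × List String)) × (List (String × List (String × Int)))) (out : List (String × List (String × Int))) : Prop := out = cod_keys_alt diccionario
instance (diccionario : (List (String × List String)) × (List (String × List (String × Int)))) (out : List (String × List (String × Int))) : Decidable (Spec_cod_keys diccionario out) := by unfold Spec_cod_keys; infer_instance

-- ===== CLAIM (what is proved, stated in full; the proofs are below) =====
def Claim_equal_cod_keys : Prop := ∀ (diccionario : (List (String × List String)) × (List (String × List (String × Int)))), Dom_cod_keys diccionario → Pre_cod_keys diccionario → Spec_cod_keys diccionario (cod_keys diccionario)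

-- ===== LEMMAS AND PROOFS =====

lemma pv_inner_keys (g : String → Bool) (est : String) (sols : List (String × Int))
    (d : PySem.Dict String (List (String × Int))) (h : ∀ c, g c = true → c ∈ d.keys) :
    (sols.foldl (fun d cp => if g cp.1 then d.modify cp.1 [] (fun l => l ++ [(est, cp.2)]) else d) d).keys = d.keys := by
  induction sols generalizing d with
  | nil => rfl
  | cons cp rest ih =>
    simp only [List.foldl_cons]
    by_cases hg : g cp.1 = true
    · have hmem : cp.1 ∈ d.keys := h cp.1 hg
      have hcont : d.contains cp.1 = true := (PySem.Dict.contains_iff_mem_keys d cp.1).2 hmem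
      have hk : (d.modify cp.1 [] (fun l => l ++ [(est, cp.2)])).keys = d.keys := by
        rw [PySem.Dict.keys_modify, PySem.Dict.keys_insert_of_contains _ _ hcont]
      rw [hg, if_pos rfl, ih _ (fun c hc => hk ▸ h c hc), hk]
    · rw [if_neg hg]
      exact ih d h

lemma pv_inner_getD (g : String → Bool) (est : String) (sols : List (String × Int))
    (d : PySem.Dict String (List (String × Int))) (c : String) (hc : g c = true) :
    (sols.foldl (fun d cp => if g cp.1 then d.modify cp.1 [] (fun l => l ++ [(est, cp.2)]) else d) d).getD c []
      = d.getD c [] ++ (sols.filter (fun cp => cp.1 == c)).map (fun cp => (est, cp.2)) := by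
  induction sols generalizing d with
  | nil => simp
  | cons cp rest ih =>
    simp only [List.foldl_cons, List.filter_cons]
    by_cases hcp : cp.1 = c
    · have hg : g cp.1 = true := by rw [hcp]; exact hc
      subst hcp
      rw [hg, if_pos rfl, ih, PySem.Dict.getD_modify_self]
      simp
    · have hbeq : (cp.1 == c) = false := by simp [hcp]
      rw [hbeq]
      by_cases hg : g cp.1 = true
      · rw [hg, if_pos rfl, ih, PySem.Dict.getD_modify_of_ne _ _ _ (fun h => hcp h.symm)]
        simp
      · simp only [hg, Bool.false_eq_true, if_false]
        rw [ih]

lemma pv_outer_keys (g : String → Bool) (studs : List (String × List (String × Int)))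
    (d : PySem.Dict String (List (String × Int))) (h : ∀ c, g c = true → c ∈ d.keys) :
    (studs.foldl (fun d sp =>
      sp.2.foldl (fun d cp => if g cp.1 then d.modify cp.1 [] (fun l => l ++ [(sp.1, cp.2)]) else d) d) d).keys = d.keys := by
  induction studs generalizing d with
  | nil => rfl
  | cons sp rest ih =>
    simp only [List.foldl_cons]
    have hk := pv_inner_keys g sp.1 sp.2 d h
    rw [ih _ (fun c hc => hk ▸ h c hc), hk]

lemma pv_outer_getD (g : String → Bool) (studs : List (String × List (String × Int)))
    (d : PySem.Dict String (List (String × Int))) (c : String) (hc : g c = true)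
    (h : ∀ c, g c = true → c ∈ d.keys) :
    (studs.foldl (fun d sp =>
      sp.2.foldl (fun d cp => if g cp.1 then d.modify cp.1 [] (fun l => l ++ [(sp.1, cp.2)]) else d) d) d).getD c []
      = d.getD c [] ++ studs.flatMap (fun sp => (sp.2.filter (fun cp => cp.1 == c)).map (fun cp => (sp.1, cp.2))) := by
  induction studs generalizing d with
  | nil => simp
  | cons sp rest ih =>
    simp only [List.foldl_cons, List.flatMap_cons]
    have hk := pv_inner_keys g sp.1 sp.2 d h
    rw [ih _ (fun c hc => hk ▸ h c hc), pv_inner_getD g sp.1 sp.2 d c hc]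
    simp [List.append_assoc]

-- ===== VERDICT (by name: the statement is the Claim_ definition above) =====
theorem cod_keys_spec : Claim_equal_cod_keys := by
  intro diccionario _hdom hpre
  obtain ⟨asg, studs⟩ := diccionario
  unfold Spec_cod_keys cod_keys cod_keys_alt
  simp only
  set g : String → Bool := fun c => asg.any (fun q => q.1 == c) with hg
  have hpre' : (asg.map Prod.fst).Nodup := hpre
  -- the seeded dict
  have hitems0 : (asg.foldl (fun d p => d.insert p.1 []) PySem.Dict.empty).items
      = asg.map (fun p => (p.1, ([] : List (String × Int)))) := by
    have := PySem.Dict.items_foldl_insert_fresh asg (fun p => p.1)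
      (fun _ => ([] : List (String × Int))) PySem.Dict.empty
      (fun a _ => by simp [PySem.Dict.contains_empty]) hpre'
    simpa using this
  set d0 := asg.foldl (fun d p => d.insert p.1 []) PySem.Dict.empty with hd0
  have hkeys0 : d0.keys = asg.map Prod.fst := by
    show d0.items.map Prod.fst = _
    rw [hitems0]; simp
  have hmem0 : ∀ c, g c = true → c ∈ d0.keys := by
    intro c hcg
    rw [hkeys0]
    simp only [hg, List.any_eq_true] at hcg
    obtain ⟨q, hq, hqc⟩ := hcg
    exact List.mem_map.2 ⟨q, hq, by simpa using hqc⟩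
  have hgetD0 : ∀ c, c ∈ asg.map Prod.fst → d0.getD c [] = [] := by
    intro c hcm
    obtain ⟨q, hq, hqc⟩ := List.mem_map.1 hcm
    have hmi : (c, ([] : List (String × Int))) ∈ d0.items := by
      rw [hitems0]
      exact List.mem_map.2 ⟨q, hq, by rw [hqc]⟩
    exact PySem.Dict.getD_of_mem_items d0 hmi (hkeys0 ▸ hpre') []
  set F := studs.foldl (fun d sp =>
      sp.2.foldl (fun d cp => if g cp.1 then d.modify cp.1 [] (fun l => l ++ [(sp.1, cp.2)]) else d) d) d0 with hF
  have hkeysF : F.keys = asg.map Prod.fst := by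
    rw [hF, pv_outer_keys g studs d0 hmem0, hkeys0]
  have hndF : F.keys.Nodup := hkeysF ▸ hpre'
  rw [PySem.Dict.items_eq_map_keys F hndF [], hkeysF, List.map_map]
  apply List.map_congr_left
  intro p hp
  simp only [Function.comp]
  have hcg : g p.1 = true := by
    simp only [hg, List.any_eq_true]
    exact ⟨p, hp, by simp⟩
  have hgd := pv_outer_getD g studs d0 p.1 hcg hmem0
  rw [← hF] at hgd
  rw [hgd, hgetD0 p.1 (List.mem_map.2 ⟨p, hp, rfl⟩), List.nil_append]
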